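-- pv_equiv track=rewrite | github.com/D4san/Galactic_Sounds | microtonal.py | create_microtonal_scale_otoman
-- ===== SOURCE A (Python) =====
-- def create_microtonal_scale_otoman(octaves=(1, 7)):
--     base_notes = ['C', 'C#', 'D', 'D#', 'E', 'F', 'F#', 'G', 'G#', 'A', 'A#', 'B']
--     steps_per_octave = 53
--     steps_per_base = [5, 5, 5, 5, 5, 4, 4, 4, 4, 4, 4, 4]
--     scale = []
--
--     for octave in range(octaves[0], octaves[1] + 1):
--         for i, base_note in enumerate(base_notes):
--             num_steps = steps_per_base[i]
--             for step in range(num_steps):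
--                 if num_steps == 5:
--                     if step == 0:
--                         note = f"{base_note}{octave}"
--                     elif step == 1:
--                         note = f"^{base_note}{octave}"
--                     elif step == 2:
--                         note = f"^^{base_note}{octave}"
--                     elif step == 3:
--                         next_base = base_notes[(i + 1) % len(base_notes)]
--                         note = f"vv{next_base}{octave}"
--                     elif step == 4:
--                         next_base = base_notes[(i + 1) % len(base_notes)]
--                         note = f"v{next_base}{octave}"
--                 elif num_steps == 4:
--                     if step == 0:
--                         note = f"{base_note}{octave}"
--                     elif step == 1:
--                         note = f"^{base_note}{octave}"
--                     elif step == 2: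
--                         note = f"^^{base_note}{octave}"
--                     elif step == 3:
--                         next_base = base_notes[(i + 1) % len(base_notes)]
--                         note = f"vv{next_base}{octave}"
--                 scale.append(note)
--
--     center_index = len(scale) // 2
--     scale.insert(center_index, 'silence')
--     return scale
-- ===== SOURCE B (Python) =====
-- def create_microtonal_scale_otoman(octaves=(1, 7)):
--     # Flat index arithmetic: note k of the whole scale is decoded by divmod,
--     # no nested loops and no per-step branching ladder.
--     base = ['C', 'C#', 'D', 'D#', 'E', 'F', 'F#', 'G', 'G#', 'A', 'A#', 'B']
--     prefixes = ['', '^', '^^', 'vv', 'v']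
--     lo, hi = octaves
--     total = 53 * (hi + 1 - lo)
--     scale = []
--     for k in range(total):
--         o = lo + k // 53
--         s = k % 53
--         if s < 25:
--             i, step = divmod(s, 5)
--         else:
--             i, step = divmod(s - 25, 4)
--             i += 5
--         letter = base[i if step < 3 else (i + 1) % 12]
--         scale.append(f"{prefixes[step]}{letter}{o}")
--     scale.insert(len(scale) // 2, 'silence')
--     return scale
-- ===== Notes on version B (the rewrite author's own statement) =====
-- stated objective: alternative
-- what changed: Replaces A's triple-nested loop with per-step if/elif ladder by a single flat loop over a global step index k, decoding octave, base index and microtonal step from k by divmod arithmetic (k//53, k%53, then divmod by 5 or 4) and selecting the prefix from a 5-element table.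
import Mathlib
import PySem

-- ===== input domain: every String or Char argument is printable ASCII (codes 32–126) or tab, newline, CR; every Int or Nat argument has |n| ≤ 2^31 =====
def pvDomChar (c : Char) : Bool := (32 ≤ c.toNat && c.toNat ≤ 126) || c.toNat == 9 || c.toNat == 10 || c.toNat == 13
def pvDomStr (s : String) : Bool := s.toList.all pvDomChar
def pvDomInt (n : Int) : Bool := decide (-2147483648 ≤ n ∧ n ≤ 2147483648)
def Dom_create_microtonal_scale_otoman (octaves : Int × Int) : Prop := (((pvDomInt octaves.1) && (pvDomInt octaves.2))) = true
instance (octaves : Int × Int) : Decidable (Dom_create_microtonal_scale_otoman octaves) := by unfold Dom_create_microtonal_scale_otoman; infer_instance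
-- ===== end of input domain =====

-- B replaces A's triple-nested loop + per-step if/elif ladder by one flat loop over a
-- global step index k, decoding octave/base/step from k by divmod arithmetic (objective: alternative).

-- ===== PORT A =====
def pvA_base : List String := ["C", "C#", "D", "D#", "E", "F", "F#", "G", "G#", "A", "A#", "B"]
def pvA_steps : List Int := [5, 5, 5, 5, 5, 4, 4, 4, 4, 4, 4, 4]

-- the if/elif ladder computing `note`; the final `else` is unreachable in Python
-- (step always 0..num_steps-1), "" stands for the never-read stale value
def pvA_note (octave i : Int) (base_note : String) (num_steps step : Int) : String :=
  if num_steps == 5 then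
    if step == 0 then base_note ++ PySem.Int.toStr octave
    else if step == 1 then "^" ++ base_note ++ PySem.Int.toStr octave
    else if step == 2 then "^^" ++ base_note ++ PySem.Int.toStr octave
    else if step == 3 then
      "vv" ++ PySem.List.pyGetD pvA_base (PySem.Int.mod (i + 1) pvA_base.length) "" ++ PySem.Int.toStr octave
    else if step == 4 then
      "v" ++ PySem.List.pyGetD pvA_base (PySem.Int.mod (i + 1) pvA_base.length) "" ++ PySem.Int.toStr octave
    else ""
  else if num_steps == 4 then
    if step == 0 then base_note ++ PySem.Int.toStr octave
    else if step == 1 then "^" ++ base_note ++ PySem.Int.toStr octave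
    else if step == 2 then "^^" ++ base_note ++ PySem.Int.toStr octave
    else if step == 3 then
      "vv" ++ PySem.List.pyGetD pvA_base (PySem.Int.mod (i + 1) pvA_base.length) "" ++ PySem.Int.toStr octave
    else ""
  else ""

def pvA_octaveBlock (octave : Int) (scale : List String) : List String :=
  (PySem.List.enumerate pvA_base).foldl (fun scale p =>
    let num_steps := PySem.List.pyGetD pvA_steps p.1 0
    (PySem.List.pyRange 0 num_steps 1).foldl
      (fun scale step => scale ++ [pvA_note octave p.1 p.2 num_steps step]) scale) scale

def create_microtonal_scale_otoman (octaves : Int × Int) : List String :=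
  let scale := (PySem.List.pyRange octaves.1 (octaves.2 + 1) 1).foldl
    (fun scale octave => pvA_octaveBlock octave scale) []
  PySem.List.insert scale (PySem.Int.floordiv scale.length 2) "silence"

-- ===== PORT B =====
def pvB_base : List String := ["C", "C#", "D", "D#", "E", "F", "F#", "G", "G#", "A", "A#", "B"]
def pvB_prefixes : List String := ["", "^", "^^", "vv", "v"]

-- body of B's flat loop: decode octave, base index i and microtonal step from the
-- global index k by divmod arithmetic
def pvB_note (lo k : Int) : String :=
  let o := lo + PySem.Int.floordiv k 53
  let s := PySem.Int.mod k 53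
  let istep : Int × Int :=
    if s < 25 then (PySem.Int.floordiv s 5, PySem.Int.mod s 5)
    else (PySem.Int.floordiv (s - 25) 4 + 5, PySem.Int.mod (s - 25) 4)
  let letter := PySem.List.pyGetD pvB_base
    (if istep.2 < 3 then istep.1 else PySem.Int.mod (istep.1 + 1) 12) ""
  PySem.List.pyGetD pvB_prefixes istep.2 "" ++ letter ++ PySem.Int.toStr o

def create_microtonal_scale_otoman_alt (octaves : Int × Int) : List String :=
  let scale := (PySem.List.pyRange 0 (53 * (octaves.2 + 1 - octaves.1)) 1).map
    (pvB_note octaves.1)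
  PySem.List.insert scale (PySem.Int.floordiv scale.length 2) "silence"

-- ===== PRECONDITION & SPEC =====
def Spec_create_microtonal_scale_otoman (octaves : Int × Int) (out : List String) : Prop := out = create_microtonal_scale_otoman_alt octaves
instance (octaves : Int × Int) (out : List String) : Decidable (Spec_create_microtonal_scale_otoman octaves out) := by unfold Spec_create_microtonal_scale_otoman; infer_instance

-- ===== CLAIM (what is proved, stated in full; the proofs are below) =====
def Claim_equal_create_microtonal_scale_otoman : Prop := ∀ (octaves : Int × Int), Dom_create_microtonal_scale_otoman octaves → Spec_create_microtonal_scale_otoman octaves (create_microtonal_scale_otoman octaves)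

-- ===== LEMMAS AND PROOFS =====

-- pvB_note with the k-divmod already performed: octave o and in-octave step s given directly
def pvRow (o s : Int) : String :=
  let istep : Int × Int :=
    if s < 25 then (PySem.Int.floordiv s 5, PySem.Int.mod s 5)
    else (PySem.Int.floordiv (s - 25) 4 + 5, PySem.Int.mod (s - 25) 4)
  let letter := PySem.List.pyGetD pvB_base
    (if istep.2 < 3 then istep.1 else PySem.Int.mod (istep.1 + 1) 12) ""
  PySem.List.pyGetD pvB_prefixes istep.2 "" ++ letter ++ PySem.Int.toStr o

lemma pvB_note_split (lo : Int) (n k : Nat) (hk : k < 53) :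
    pvB_note lo (53 * (n : Int) + (k : Int)) = pvRow (lo + n) (k : Int) := by
  have hd : PySem.Int.floordiv (53 * (n : Int) + (k : Int)) 53 = n := by
    rw [PySem.Int.floordiv_eq_ediv_of_pos (by norm_num)]; omega
  have hm : PySem.Int.mod (53 * (n : Int) + (k : Int)) 53 = k := by
    rw [PySem.Int.mod_eq_emod_of_pos (by norm_num)]; omega
  simp only [pvB_note, pvRow, hd, hm]

-- one octave of A's triple loop is B's 53 decoded rows at that octave
lemma pvA_block_eq (o : Int) (sc : List String) :
    pvA_octaveBlock o sc = sc ++ (List.range 53).map (fun j : Nat => pvRow o (j : Int)) := by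
  simp [pvA_octaveBlock, pvA_base, pvA_steps, pvA_note, pvRow, pvB_base, pvB_prefixes,
    PySem.List.enumerate, PySem.List.pyRange, PySem.List.pyGetD, PySem.Int.mod,
    PySem.Int.floordiv, List.foldl, List.range_succ, List.append_assoc]

-- A's octave fold equals B's flat map over the global index range
lemma pv_main (lo : Int) (n : Nat) :
    (PySem.List.pyRange lo (lo + (n : Int)) 1).foldl
        (fun sc o => pvA_octaveBlock o sc) []
      = (PySem.List.pyRange 0 (53 * (n : Int)) 1).map (pvB_note lo) := by
  induction n with
  | zero => simp [PySem.List.pyRange_one_eq_nil]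
  | succ n ih =>
    have h1 : lo + ((n + 1 : Nat) : Int) = (lo + (n : Int)) + 1 := by push_cast; ring
    have h2 : (53 : Int) * ((n + 1 : Nat) : Int) = 53 * (n : Int) + 53 := by push_cast; ring
    rw [h1, PySem.List.pyRange_one_succ_right (by omega), List.foldl_append]
    simp only [List.foldl_cons, List.foldl_nil]
    rw [ih, pvA_block_eq]
    rw [h2, PySem.List.pyRange_one_append 0 (53 * (n : Int)) (53 * (n : Int) + 53)
      (by positivity) (by omega), List.map_append]
    congr 1
    rw [PySem.List.pyRange_one]
    have h3 : ((53 * (n : Int) + 53 - 53 * (n : Int))).toNat = 53 := by omega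
    rw [h3, List.map_map]
    exact List.map_congr_left fun k hk =>
      (pvB_note_split lo n k (List.mem_range.mp hk)).symm

lemma pv_scales_eq (lo hi : Int) :
    (PySem.List.pyRange lo (hi + 1) 1).foldl (fun sc o => pvA_octaveBlock o sc) []
      = (PySem.List.pyRange 0 (53 * (hi + 1 - lo)) 1).map (pvB_note lo) := by
  by_cases h : hi + 1 ≤ lo
  · rw [PySem.List.pyRange_one_eq_nil h, PySem.List.pyRange_one_eq_nil (by omega)]
    simp
  · have hn : hi + 1 = lo + ((hi + 1 - lo).toNat : Int) := by omega
    rw [hn]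
    have hm : 53 * (lo + (((hi + 1 - lo).toNat : Int)) - lo) = 53 * (((hi + 1 - lo).toNat : Int)) := by ring
    rw [hm, pv_main]

-- ===== VERDICT (by name: the statement is the Claim_ definition above) =====
theorem create_microtonal_scale_otoman_spec : Claim_equal_create_microtonal_scale_otoman := by
  intro octaves _
  show _ = _
  simp only [create_microtonal_scale_otoman, create_microtonal_scale_otoman_alt,
    pv_scales_eq]
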